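-- pv_equiv track=rewrite | github.com/steven-studio/mini-ir-register-allocator | reg_alloc.py | build_interference_graph
-- ===== SOURCE A (Python) =====
-- def build_interference_graph(live_ranges):
--     variables = list(live_ranges.keys())
--     graph = {var: set() for var in variables}
--     for i in range(len(variables)):
--         for j in range(i+1, len(variables)):
--             a, b = variables[i], variables[j]
--             ra, rb = live_ranges[a], live_ranges[b]
--             if not (ra[1] < rb[0] or rb[1] < ra[0]):
--                 graph[a].add(b)
--                 graph[b].add(a)
--     return graph
-- ===== SOURCE B (Python) =====
-- def build_interference_graph(live_ranges):
--     items = list(live_ranges.items())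
--     n = len(items)
--     order = sorted(range(n), key=lambda i: items[i][1][0])
--     adj = [[] for _ in range(n)]
--     active = []
--     for i in order:
--         start_i = items[i][1][0]
--         end_i = items[i][1][1]
--         active = [j for j in active if start_i <= items[j][1][1]]
--         for j in active:
--             if items[j][1][0] <= end_i:
--                 adj[i].append(j)
--                 adj[j].append(i)
--         active.append(i)
--     return {items[i][0]: set(items[j][0] for j in sorted(adj[i])) for i in range(n)}
-- ===== Notes on version B (the rewrite author's own statement) =====
-- stated objective: alternative
-- what changed: B replaces A's all-pairs double loop over the variable list by a sweep line: indices sorted by range start, an active list pruned at each step by the current start, pair connections made only against surviving active intervals, adjacency collected per index and mapped to names at the end.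
-- outside the precondition, e.g. on build_interference_graph({'a': ()}): A returns {'a': set()}, B raises IndexError; on build_interference_graph({'a': (0, 1), 'b': (5,)}): A returns {'a': set(), 'b': set()}, B raises IndexError
import Mathlib
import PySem

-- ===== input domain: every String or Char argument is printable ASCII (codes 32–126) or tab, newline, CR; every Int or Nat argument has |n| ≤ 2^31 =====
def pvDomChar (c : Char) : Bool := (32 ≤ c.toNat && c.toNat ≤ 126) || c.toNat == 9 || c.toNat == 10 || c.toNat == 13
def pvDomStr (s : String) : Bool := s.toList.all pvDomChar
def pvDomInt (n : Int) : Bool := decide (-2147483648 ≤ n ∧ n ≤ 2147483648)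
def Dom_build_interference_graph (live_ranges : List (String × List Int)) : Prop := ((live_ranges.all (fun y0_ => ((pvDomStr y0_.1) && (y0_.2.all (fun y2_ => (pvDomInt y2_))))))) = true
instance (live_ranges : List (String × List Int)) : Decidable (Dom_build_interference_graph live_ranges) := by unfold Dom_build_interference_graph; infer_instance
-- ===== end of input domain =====

-- B replaces A's all-pairs double loop by a sweep line: sort vars_ by range start, keep an
-- active list pruned by the current start, and connect each variable to the still-active overlapping
-- ones (alternative algorithm; asymptotically O(n log n + overlaps) instead of always Θ(n²) pairs).

-- ===== PORT A =====
def build_interference_graph (live_ranges : List (String × List Int)) : List (String × List String) :=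
  let d := PySem.Dict.ofList live_ranges
  let vars_ := d.keys
  let graph0 : PySem.Dict String (PySem.Set String) :=
    vars_.foldl (fun g v => g.insert v PySem.Set.empty) PySem.Dict.empty
  let n : Int := (vars_.length : Int)
  let graph := (PySem.List.pyRange 0 n 1).foldl (fun g i =>
    (PySem.List.pyRange (i+1) n 1).foldl (fun g j =>
      let a := PySem.List.pyGetD vars_ i ""
      let b := PySem.List.pyGetD vars_ j ""
      let ra := d.getD a []
      let rb := d.getD b []
      -- ra[1] etc.: pyGetD is exact under Pre_ (every range has ≥ 2 entries); Python raises outside Pre_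
      if ¬ (PySem.List.pyGetD ra 1 0 < PySem.List.pyGetD rb 0 0 ∨ PySem.List.pyGetD rb 1 0 < PySem.List.pyGetD ra 0 0) then
        (g.modify a [] (fun s => PySem.Set.add s b)).modify b [] (fun s => PySem.Set.add s a)
      else g) g) graph0
  graph.items

-- ===== PORT B =====
def build_interference_graph_alt (live_ranges : List (String × List Int)) : List (String × List String) :=
  let items := (PySem.Dict.ofList live_ranges).items
  let n : Int := (items.length : Int)
  let order := PySem.List.sorted (PySem.List.pyRange 0 n 1)
      (fun i => PySem.List.pyGetD (PySem.List.pyGetD items i ("", [])).2 0 0) false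
  let st := order.foldl (fun (st : List (List Int) × List Int) i =>
      let start_i := PySem.List.pyGetD (PySem.List.pyGetD items i ("", [])).2 0 0
      let end_i := PySem.List.pyGetD (PySem.List.pyGetD items i ("", [])).2 1 0
      let active := st.2.filter (fun j => start_i ≤ PySem.List.pyGetD (PySem.List.pyGetD items j ("", [])).2 1 0)
      let adj := active.foldl (fun adj j =>
          if PySem.List.pyGetD (PySem.List.pyGetD items j ("", [])).2 0 0 ≤ end_i then
            PySem.List.pySetD (PySem.List.pySetD adj i (PySem.List.pyGetD adj i [] ++ [j])) j
              (PySem.List.pyGetD adj j [] ++ [i])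
          else adj) st.1
      (adj, active ++ [i]))
    (List.replicate items.length ([] : List Int), ([] : List Int))
  (PySem.List.pyRange 0 n 1).map (fun i =>
    ((PySem.List.pyGetD items i ("", [])).1,
     PySem.Set.ofList ((PySem.List.sorted (PySem.List.pyGetD st.1 i []) (fun x => x) false).map
       (fun j => (PySem.List.pyGetD items j ("", [])).1))))

-- ===== PRECONDITION & SPEC =====
-- Pre_ excludes inputs where some value tuple of the (deduplicated) dict has fewer than 2 entries:
-- on those A raises IndexError except in corner cases (a single variable, or a comparison skipped by
-- `or` short-circuit) where A happens to return; the natural B raises IndexError on all of them.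
-- (The two Lean ports, which totalise x[i] with pyGetD, agree even outside Pre_; Pre_ marks where
-- the Python programs themselves return normally, which is what the ports are faithful to.)
def Pre_build_interference_graph (live_ranges : List (String × List Int)) : Prop :=
  ∀ p ∈ (PySem.Dict.ofList live_ranges).items, 2 ≤ p.2.length
instance (live_ranges : List (String × List Int)) : Decidable (Pre_build_interference_graph live_ranges) := by unfold Pre_build_interference_graph; infer_instance
def pvWitness_build_interference_graph : (List (String × List Int)) :=
  [("a", [0, 4]), ("b", [3, 7]), ("c", [9, 12])]

def Spec_build_interference_graph (live_ranges : List (String × List Int)) (out : List (String × List String)) : Prop := out = build_interference_graph_alt live_ranges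
instance (live_ranges : List (String × List Int)) (out : List (String × List String)) : Decidable (Spec_build_interference_graph live_ranges out) := by unfold Spec_build_interference_graph; infer_instance

-- ===== CLAIM (what is proved, stated in full; the proofs are below) =====
def Claim_equal_build_interference_graph : Prop := ∀ (live_ranges : List (String × List Int)), Dom_build_interference_graph live_ranges → Pre_build_interference_graph live_ranges → Spec_build_interference_graph live_ranges (build_interference_graph live_ranges)

-- ===== LEMMAS AND PROOFS =====

-- proof-side helpers: an index-level canonical description of the result
def pvNm (items : List (String × List Int)) (i : Int) : String :=
  (PySem.List.pyGetD items i ("", [])).1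

def pvIv (items : List (String × List Int)) (i : Int) : List Int :=
  (PySem.List.pyGetD items i ("", [])).2

def pvLo (items : List (String × List Int)) (i : Int) : Int :=
  PySem.List.pyGetD (pvIv items i) 0 0

def pvHi (items : List (String × List Int)) (i : Int) : Int :=
  PySem.List.pyGetD (pvIv items i) 1 0

def pvOV (items : List (String × List Int)) (i j : Int) : Bool :=
  decide (pvLo items j ≤ pvHi items i) && decide (pvLo items i ≤ pvHi items j)

def pvCanon (items : List (String × List Int)) : List (String × List String) :=
  (PySem.List.pyRange 0 (items.length : Int) 1).map (fun k => (pvNm items k,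
    ((PySem.List.pyRange 0 (items.length : Int) 1).filter
        (fun j => j != k && pvOV items k j)).map (pvNm items)))

def pvPairs (n : Int) : List (Int × Int) :=
  (PySem.List.pyRange 0 n 1).flatMap (fun i => (PySem.List.pyRange (i+1) n 1).map (fun j => (i, j)))

def pvSel (k : Int) (p : Int × Int) : Option Int :=
  if p.1 = k then some p.2 else if p.2 = k then some p.1 else none

lemma pvOV_symm (items : List (String × List Int)) (i j : Int) :
    pvOV items i j = pvOV items j i := by
  simp [pvOV, Bool.and_comm]

lemma pv_foldl_foldl_flatMap {α β γ : Type} (l : List α) (f : α → List β)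
    (step : γ → α → β → γ) (init : γ) :
    l.foldl (fun g i => (f i).foldl (fun g j => step g i j) g) init
      = (l.flatMap (fun i => (f i).map (fun j => (i, j)))).foldl (fun g p => step g p.1 p.2) init := by
  induction l generalizing init with
  | nil => rfl
  | cons a l ih => simp [List.flatMap_cons, List.foldl_append, List.foldl_map, ih]

lemma pv_cond_iff (items : List (String × List Int)) (i j : Int) :
    (¬ (pvHi items i < pvLo items j ∨ pvHi items j < pvLo items i)) ↔ pvOV items i j = true := by
  simp [pvOV, not_or, not_lt, and_comm]

lemma pv_mem_pvPairs {n : Int} {p : Int × Int} (hp : p ∈ pvPairs n) :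
    0 ≤ p.1 ∧ p.1 < p.2 ∧ p.2 < n := by
  simp only [pvPairs, List.mem_flatMap, List.mem_map] at hp
  obtain ⟨i, hi, j, hj, rfl⟩ := hp
  rw [PySem.List.mem_pyRange_one] at hi hj
  exact ⟨hi.1, by omega, hj.2⟩

lemma pvNm_inj (items : List (String × List Int)) (hnd : (items.map Prod.fst).Nodup)
    {i j : Int} (hi0 : 0 ≤ i) (hi1 : i < (items.length : Int))
    (hj0 : 0 ≤ j) (hj1 : j < (items.length : Int)) :
    pvNm items i = pvNm items j ↔ i = j := by
  constructor
  · intro h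
    rw [pvNm, pvNm, PySem.List.pyGetD_eq_getElem items _ hi0 hi1,
        PySem.List.pyGetD_eq_getElem items _ hj0 hj1] at h
    have hinj : i.toNat = j.toNat := by
      have := List.nodup_iff_injective_get.mp hnd
      have hg : (items.map Prod.fst).get ⟨i.toNat, by simp; omega⟩
          = (items.map Prod.fst).get ⟨j.toNat, by simp; omega⟩ := by
        simp only [List.get_eq_getElem, List.getElem_map]
        exact h
      simpa using congrArg Fin.val (this hg)
    omega
  · intro h; rw [h]

lemma pv_getD_pairFold (items : List (String × List Int)) (E : List (Int × Int))
    (g : PySem.Dict String (List String)) (x : String)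
    (hne : ∀ p ∈ E, pvNm items p.1 ≠ pvNm items p.2) :
    (E.foldl (fun g p => if pvOV items p.1 p.2 = true then
        (g.modify (pvNm items p.1) [] (fun s => PySem.Set.add s (pvNm items p.2))).modify
          (pvNm items p.2) [] (fun s => PySem.Set.add s (pvNm items p.1))
      else g) g).getD x []
    = E.foldl (fun s p => if pvOV items p.1 p.2 = true then
        (if pvNm items p.1 = x then PySem.Set.add s (pvNm items p.2)
         else if pvNm items p.2 = x then PySem.Set.add s (pvNm items p.1) else s)
      else s) (g.getD x []) := by
  induction E generalizing g with
  | nil => rfl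
  | cons p E ih =>
    have hp := hne p List.mem_cons_self
    have hne' : ∀ q ∈ E, pvNm items q.1 ≠ pvNm items q.2 :=
      fun q hq => hne q (List.mem_cons_of_mem p hq)
    by_cases hov : pvOV items p.1 p.2 = true
    · simp only [List.foldl_cons, hov, if_true, ih _ hne']
      congr 1
      rw [PySem.Dict.getD_modify, PySem.Dict.getD_modify]
      by_cases h2 : x = pvNm items p.2
      · subst h2
        simp [hp, Ne.symm hp]
      · by_cases h1 : x = pvNm items p.1
        · subst h1
          simp [hp]
        · simp [PySem.Dict.getD_modify, h1, h2, Ne.symm h1, Ne.symm h2]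
    · simp only [List.foldl_cons, if_neg hov]
      exact ih _ hne' 

lemma pv_fold_sel (items : List (String × List Int)) (E : List (Int × Int)) (k : Int)
    (s0 : List String)
    (hinj : ∀ p ∈ E, (pvNm items p.1 = pvNm items k ↔ p.1 = k) ∧
                     (pvNm items p.2 = pvNm items k ↔ p.2 = k)) :
    E.foldl (fun s p => if pvOV items p.1 p.2 = true then
        (if pvNm items p.1 = pvNm items k then PySem.Set.add s (pvNm items p.2)
         else if pvNm items p.2 = pvNm items k then PySem.Set.add s (pvNm items p.1) else s)
      else s) s0
    = (E.filterMap (pvSel k)).foldl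
        (fun s q => if pvOV items k q = true then PySem.Set.add s (pvNm items q) else s) s0 := by
  induction E generalizing s0 with
  | nil => rfl
  | cons p E ih =>
    have hp := hinj p List.mem_cons_self
    have hinj' : ∀ q ∈ E, (pvNm items q.1 = pvNm items k ↔ q.1 = k) ∧
        (pvNm items q.2 = pvNm items k ↔ q.2 = k) :=
      fun q hq => hinj q (List.mem_cons_of_mem p hq)
    by_cases h1 : p.1 = k
    · have e : List.filterMap (pvSel k) (p :: E) = p.2 :: List.filterMap (pvSel k) E := by
        simp [pvSel, h1]
      rw [e, List.foldl_cons, List.foldl_cons]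
      have e2 : (if pvOV items p.1 p.2 = true then
          (if pvNm items p.1 = pvNm items k then PySem.Set.add s0 (pvNm items p.2)
           else if pvNm items p.2 = pvNm items k then PySem.Set.add s0 (pvNm items p.1) else s0)
          else s0) = (if pvOV items k p.2 = true then PySem.Set.add s0 (pvNm items p.2) else s0) := by
        rw [h1]; simp
      rw [e2]; exact ih _ hinj'
    · have h1' : ¬ pvNm items p.1 = pvNm items k := fun h => h1 (hp.1.mp h)
      by_cases h2 : p.2 = k
      · have e : List.filterMap (pvSel k) (p :: E) = p.1 :: List.filterMap (pvSel k) E := by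
          simp [pvSel, h1, h2]
        rw [e, List.foldl_cons, List.foldl_cons]
        have e2 : (if pvOV items p.1 p.2 = true then
            (if pvNm items p.1 = pvNm items k then PySem.Set.add s0 (pvNm items p.2)
             else if pvNm items p.2 = pvNm items k then PySem.Set.add s0 (pvNm items p.1) else s0)
            else s0) = (if pvOV items k p.1 = true then PySem.Set.add s0 (pvNm items p.1) else s0) := by
          rw [h2, pvOV_symm items p.1 k]; simp [h1']
        rw [e2]; exact ih _ hinj'
      · have h2' : ¬ pvNm items p.2 = pvNm items k := fun h => h2 (hp.2.mp h)
        have e : List.filterMap (pvSel k) (p :: E) = List.filterMap (pvSel k) E := by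
          simp [pvSel, h1, h2]
        rw [e, List.foldl_cons]
        have e2 : (if pvOV items p.1 p.2 = true then
            (if pvNm items p.1 = pvNm items k then PySem.Set.add s0 (pvNm items p.2)
             else if pvNm items p.2 = pvNm items k then PySem.Set.add s0 (pvNm items p.1) else s0)
            else s0) = s0 := by
          simp [h1', h2']
        rw [e2]; exact ih _ hinj'

lemma pv_filterMap_if_eq {k i : Int} (l : List Int) (hn : l.Nodup) :
    l.filterMap (fun j => if j = k then some i else none) = if k ∈ l then [i] else [] := by
  induction l with
  | nil => simp
  | cons a l ih =>
    rcases List.nodup_cons.mp hn with ⟨ha, hl⟩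
    by_cases hak : a = k
    · subst hak
      simp [ih hl, ha]
    · simp [hak, ih hl, List.mem_cons, Ne.symm hak]

lemma pv_sel_pairs (n k : Int) (h0 : 0 ≤ k) (h1 : k < n) :
    (pvPairs n).filterMap (pvSel k)
      = PySem.List.pyRange 0 k 1 ++ PySem.List.pyRange (k+1) n 1 := by
  have hsplit : PySem.List.pyRange 0 n 1 = PySem.List.pyRange 0 k 1 ++ k :: PySem.List.pyRange (k+1) n 1 := by
    rw [PySem.List.pyRange_one_append 0 k n h0 (le_of_lt h1), PySem.List.pyRange_one_cons h1]
  rw [pvPairs, hsplit, List.filterMap_flatMap, List.flatMap_append, List.flatMap_cons]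
  have piece1 : (PySem.List.pyRange 0 k 1).flatMap
      (fun i => ((PySem.List.pyRange (i+1) n 1).map (fun j => (i, j))).filterMap (pvSel k))
      = (PySem.List.pyRange 0 k 1).flatMap (fun i => [i]) := by
    apply List.flatMap_congr
    intro i hi
    rw [PySem.List.mem_pyRange_one] at hi
    rw [List.filterMap_map]
    have hfun : (pvSel k ∘ fun j => (i, j)) = fun j => if j = k then some i else none := by
      funext j
      simp only [Function.comp, pvSel]
      rw [if_neg (by omega : ¬ i = k)]
    rw [hfun, pv_filterMap_if_eq _ (PySem.List.nodup_pyRange_one _ _),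
      if_pos (PySem.List.mem_pyRange_one.mpr (by omega))]
  have piece2 : ((PySem.List.pyRange (k+1) n 1).map (fun j => (k, j))).filterMap (pvSel k)
      = PySem.List.pyRange (k+1) n 1 := by
    rw [List.filterMap_map]
    have hfun : (pvSel k ∘ fun j => (k, j)) = some := by
      funext j; simp [pvSel]
    rw [hfun, List.filterMap_some]
  have piece3 : (PySem.List.pyRange (k+1) n 1).flatMap
      (fun i => ((PySem.List.pyRange (i+1) n 1).map (fun j => (i, j))).filterMap (pvSel k))
      = [] := by
    apply List.flatMap_eq_nil_iff.mpr
    intro i hi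
    rw [PySem.List.mem_pyRange_one] at hi
    rw [List.filterMap_map]
    have hfun : (pvSel k ∘ fun j => (i, j)) = fun j => if j = k then some i else none := by
      funext j
      simp only [Function.comp, pvSel]
      rw [if_neg (by omega : ¬ i = k)]
    rw [hfun, pv_filterMap_if_eq _ (PySem.List.nodup_pyRange_one _ _),
      if_neg (by rw [PySem.List.mem_pyRange_one]; omega)]
  rw [piece1, piece2, piece3, List.flatMap_singleton']
  simp

lemma pv_canon_row_split (items : List (String × List Int)) (n k : Int)
    (h0 : 0 ≤ k) (h1 : k < n) :
    (PySem.List.pyRange 0 n 1).filter (fun j => j != k && pvOV items k j)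
      = (PySem.List.pyRange 0 k 1 ++ PySem.List.pyRange (k+1) n 1).filter
          (fun j => pvOV items k j) := by
  have hsplit : PySem.List.pyRange 0 n 1 = PySem.List.pyRange 0 k 1 ++ k :: PySem.List.pyRange (k+1) n 1 := by
    rw [PySem.List.pyRange_one_append 0 k n h0 (le_of_lt h1), PySem.List.pyRange_one_cons h1]
  rw [hsplit, List.filter_append, List.filter_append, List.filter_cons]
  rw [if_neg (by simp)]
  congr 1
  · apply List.filter_congr
    intro j hj
    rw [PySem.List.mem_pyRange_one] at hj
    have : (j != k) = true := by simp; omega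
    rw [this, Bool.true_and]
  · apply List.filter_congr
    intro j hj
    rw [PySem.List.mem_pyRange_one] at hj
    have : (j != k) = true := by simp; omega
    rw [this, Bool.true_and]

lemma pv_foldl_add_filter (nmf : Int → String) (c : Int → Bool) (ps qs : List Int)
    (h : ((qs ++ ps).map nmf).Nodup) :
    ps.foldl (fun s q => if c q = true then PySem.Set.add s (nmf q) else s) (qs.map nmf)
      = ((qs ++ ps.filter (fun q => c q)).map nmf) := by
  induction ps generalizing qs with
  | nil => simp
  | cons p ps ih =>
    by_cases hc : c p = true
    · have hnotin : nmf p ∉ qs.map nmf := by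
        intro hmem
        have hh : ((qs ++ p :: ps).map nmf).Nodup := h
        rw [List.map_append, List.nodup_append] at hh
        exact hh.2.2 (nmf p) hmem (nmf p) (List.mem_map_of_mem List.mem_cons_self) rfl
      have hadd : PySem.Set.add (qs.map nmf) (nmf p) = qs.map nmf ++ [nmf p] := by
        rw [PySem.Set.add_eq_ite]; simp [hnotin]
      have h' : (((qs ++ [p]) ++ ps).map nmf).Nodup := by
        have : (qs ++ [p]) ++ ps = qs ++ ([p] ++ ps) := by simp
        rw [this]; simpa using h
      calc (p :: ps).foldl (fun s q => if c q = true then PySem.Set.add s (nmf q) else s) (qs.map nmf)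
          = ps.foldl (fun s q => if c q = true then PySem.Set.add s (nmf q) else s) ((qs ++ [p]).map nmf) := by
            simp [hc, hadd]
        _ = (((qs ++ [p]) ++ ps.filter (fun q => c q)).map nmf) := ih (qs ++ [p]) h'
        _ = ((qs ++ (p :: ps).filter (fun q => c q)).map nmf) := by simp [hc]
    · have h' : ((qs ++ ps).map nmf).Nodup := by
        have hperm : (qs ++ p :: ps).Sublist (qs ++ p :: ps) := List.Sublist.refl _
        have : (qs ++ ps).Sublist (qs ++ p :: ps) :=
          List.Sublist.append_left (List.sublist_cons_self p ps) qs
        exact (this.map nmf).nodup h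
      simp [ih qs h', hc]

lemma pv_keys_pairFold (items : List (String × List Int)) (E : List (Int × Int))
    (g : PySem.Dict String (List String))
    (hmem : ∀ p ∈ E, pvNm items p.1 ∈ g.keys ∧ pvNm items p.2 ∈ g.keys) :
    (E.foldl (fun g p => if pvOV items p.1 p.2 = true then
        (g.modify (pvNm items p.1) [] (fun s => PySem.Set.add s (pvNm items p.2))).modify
          (pvNm items p.2) [] (fun s => PySem.Set.add s (pvNm items p.1))
      else g) g).keys = g.keys := by
  induction E generalizing g with
  | nil => rfl
  | cons p E ih =>
    have hp := hmem p List.mem_cons_self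
    have hmem' : ∀ q ∈ E, pvNm items q.1 ∈ g.keys ∧ pvNm items q.2 ∈ g.keys :=
      fun q hq => hmem q (List.mem_cons_of_mem p hq)
    by_cases hov : pvOV items p.1 p.2 = true
    · have hk1 : ((g.modify (pvNm items p.1) [] (fun s => PySem.Set.add s (pvNm items p.2))).modify
          (pvNm items p.2) [] (fun s => PySem.Set.add s (pvNm items p.1))).keys = g.keys := by
        rw [PySem.Dict.keys_modify, PySem.Dict.keys_insert_of_contains, PySem.Dict.keys_modify,
          PySem.Dict.keys_insert_of_contains]
        · exact (PySem.Dict.contains_iff_mem_keys g _).mpr hp.1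
        · simp [PySem.Dict.contains_modify, (PySem.Dict.contains_iff_mem_keys g _).mpr hp.2]
      simp only [List.foldl_cons, hov, if_true]
      rw [ih]
      · exact hk1
      · intro q hq; rw [hk1]; exact hmem' q hq
    · simp only [List.foldl_cons, if_neg hov]
      exact ih _ hmem' 


lemma pv_bounds_nm_mem (items : List (String × List Int)) {k : Int}
    (h0 : 0 ≤ k) (h1 : k < (items.length : Int)) :
    pvNm items k ∈ items.map Prod.fst := by
  rw [pvNm, PySem.List.pyGetD_eq_getElem items ("", []) h0 h1]
  exact List.mem_map_of_mem (List.getElem_mem _)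

lemma pv_pair_mem_iv (items : List (String × List Int)) {k : Int}
    (h0 : 0 ≤ k) (h1 : k < (items.length : Int)) :
    (pvNm items k, pvIv items k) ∈ items := by
  rw [pvNm, pvIv, PySem.List.pyGetD_eq_getElem items ("", []) h0 h1]
  exact List.getElem_mem _

lemma pv_ps_nodup_map (items : List (String × List Int)) (hnd' : (items.map Prod.fst).Nodup)
    (k : Int) (h0 : 0 ≤ k) (h1 : k < (items.length : Int)) :
    (((PySem.List.pyRange 0 k 1 ++ PySem.List.pyRange (k+1) (items.length : Int) 1)).map
      (pvNm items)).Nodup := by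
  apply List.Nodup.map_on
  · intro x hx y hy hxy
    rw [List.mem_append, PySem.List.mem_pyRange_one, PySem.List.mem_pyRange_one] at hx hy
    exact (pvNm_inj items hnd' (by omega) (by omega) (by omega) (by omega)).mp hxy
  · apply List.Nodup.append (PySem.List.nodup_pyRange_one _ _) (PySem.List.nodup_pyRange_one _ _)
    intro a ha hb
    rw [PySem.List.mem_pyRange_one] at ha hb
    omega

lemma pv_A_main (items : List (String × List Int)) (hnd' : (items.map Prod.fst).Nodup)
    (g0 : PySem.Dict String (List String))
    (hg0keys : g0.keys = items.map Prod.fst)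
    (hg0getD : ∀ k : Int, 0 ≤ k → k < (items.length : Int) → g0.getD (pvNm items k) [] = []) :
    ((pvPairs (items.length : Int)).foldl (fun g p => if pvOV items p.1 p.2 = true then
        (g.modify (pvNm items p.1) [] (fun s => PySem.Set.add s (pvNm items p.2))).modify
          (pvNm items p.2) [] (fun s => PySem.Set.add s (pvNm items p.1))
      else g) g0).items = pvCanon items := by
  set F := (fun (g : PySem.Dict String (List String)) (p : Int × Int) =>
    if pvOV items p.1 p.2 = true then
        (g.modify (pvNm items p.1) [] (fun s => PySem.Set.add s (pvNm items p.2))).modify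
          (pvNm items p.2) [] (fun s => PySem.Set.add s (pvNm items p.1))
      else g) with hF
  have hnd0 : g0.keys.Nodup := by rw [hg0keys]; exact hnd'
  have hbounds : ∀ p ∈ pvPairs (items.length : Int),
      0 ≤ p.1 ∧ p.1 < (items.length : Int) ∧ 0 ≤ p.2 ∧ p.2 < (items.length : Int) ∧ p.1 ≠ p.2 := by
    intro p hp
    have := pv_mem_pvPairs hp
    exact ⟨this.1, by omega, by omega, this.2.2, by omega⟩
  have hkeysF : ((pvPairs (items.length : Int)).foldl F g0).keys = g0.keys := by
    apply pv_keys_pairFold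
    intro p hp
    obtain ⟨h1, h2, h3, h4, h5⟩ := hbounds p hp
    rw [hg0keys]
    exact ⟨pv_bounds_nm_mem items h1 h2, pv_bounds_nm_mem items h3 h4⟩
  have hndF : ((pvPairs (items.length : Int)).foldl F g0).keys.Nodup := by
    rw [hkeysF]; exact hnd0
  rw [PySem.Dict.items_eq_map_keys _ hndF [], hkeysF, hg0keys]
  have hrow : ∀ k : Int, 0 ≤ k → k < (items.length : Int) →
      ((pvPairs (items.length : Int)).foldl F g0).getD (pvNm items k) []
      = ((PySem.List.pyRange 0 (items.length : Int) 1).filter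
          (fun j => j != k && pvOV items k j)).map (pvNm items) := by
    intro k hk0 hk1
    rw [hF]
    rw [pv_getD_pairFold items _ g0 (pvNm items k) (by
      intro p hp
      obtain ⟨h1, h2, h3, h4, h5⟩ := hbounds p hp
      intro hcon
      exact h5 ((pvNm_inj items hnd' h1 h2 h3 h4).mp hcon))]
    rw [pv_fold_sel items _ k _ (by
      intro p hp
      obtain ⟨h1, h2, h3, h4, h5⟩ := hbounds p hp
      exact ⟨pvNm_inj items hnd' h1 h2 hk0 hk1, pvNm_inj items hnd' h3 h4 hk0 hk1⟩)]
    rw [pv_sel_pairs _ k hk0 hk1, hg0getD k hk0 hk1]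
    have hlift := pv_foldl_add_filter (pvNm items) (fun q => pvOV items k q)
      (PySem.List.pyRange 0 k 1 ++ PySem.List.pyRange (k+1) (items.length : Int) 1) []
      (by simpa using pv_ps_nodup_map items hnd' k hk0 hk1)
    simp only [List.map_nil, List.nil_append] at hlift
    rw [hlift, ← pv_canon_row_split items _ k hk0 hk1]
  rw [pvCanon]
  have hmapkeys : items.map Prod.fst
      = (PySem.List.pyRange 0 (items.length : Int) 1).map (fun i => pvNm items i) := by
    have h := PySem.List.map_pyGetD_pyRange_zero (items.map Prod.fst) ""
    simp only [PySem.List.len_eq, List.length_map] at h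
    rw [← h]
    apply List.map_congr_left
    intro i _
    simp only [pvNm]
    simpa using PySem.List.pyGetD_map Prod.fst items i ("", [])
  rw [hmapkeys, List.map_map]
  apply List.map_congr_left
  intro k hk
  rw [PySem.List.mem_pyRange_one] at hk
  simp only [Function.comp]
  rw [hrow k hk.1 hk.2]

lemma pv_A_eq_canon (lr : List (String × List Int)) :
    build_interference_graph lr = pvCanon (PySem.Dict.ofList lr).items := by
  unfold build_interference_graph
  dsimp only
  have hnd : (PySem.Dict.ofList lr).keys.Nodup := PySem.Dict.nodup_keys_ofList lr
  revert hnd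
  generalize (PySem.Dict.ofList lr) = d
  intro hnd
  have hkeys : d.keys = d.items.map Prod.fst := rfl
  have hnd' : (d.items.map Prod.fst).Nodup := by rw [← hkeys]; exact hnd
  have hlen : (d.keys.length : Int) = (d.items.length : Int) := by rw [hkeys]; simp
  have hnm : ∀ i : Int, PySem.List.pyGetD d.keys i "" = pvNm d.items i := by
    intro i
    rw [hkeys, pvNm]
    simpa using PySem.List.pyGetD_map Prod.fst d.items i ("", [])
  have hiv : ∀ i : Int, 0 ≤ i → i < (d.items.length : Int) →
      d.getD (pvNm d.items i) [] = pvIv d.items i := by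
    intro i h0 h1
    exact PySem.Dict.getD_of_mem_items d (pv_pair_mem_iv d.items h0 h1) hnd []
  rw [hlen]
  rw [pv_foldl_foldl_flatMap (PySem.List.pyRange 0 (d.items.length : Int) 1)
    (fun i => PySem.List.pyRange (i+1) (d.items.length : Int) 1)]
  rw [show (PySem.List.pyRange 0 (d.items.length : Int) 1).flatMap
      (fun i => (PySem.List.pyRange (i+1) (d.items.length : Int) 1).map (fun j => (i, j)))
      = pvPairs (d.items.length : Int) from rfl]
  have hstep : ∀ (g : PySem.Dict String (PySem.Set String)), ∀ p ∈ pvPairs (d.items.length : Int),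
      (fun (g : PySem.Dict String (PySem.Set String)) (p : Int × Int) =>
        if ¬ (PySem.List.pyGetD (d.getD (PySem.List.pyGetD d.keys p.1 "") []) 1 0 <
                PySem.List.pyGetD (d.getD (PySem.List.pyGetD d.keys p.2 "") []) 0 0 ∨
              PySem.List.pyGetD (d.getD (PySem.List.pyGetD d.keys p.2 "") []) 1 0 <
                PySem.List.pyGetD (d.getD (PySem.List.pyGetD d.keys p.1 "") []) 0 0) then
          (g.modify (PySem.List.pyGetD d.keys p.1 "") [] fun s =>
                s.add (PySem.List.pyGetD d.keys p.2 "")).modify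
            (PySem.List.pyGetD d.keys p.2 "") [] fun s => s.add (PySem.List.pyGetD d.keys p.1 "")
        else g) g p
      = (fun (g : PySem.Dict String (PySem.Set String)) (p : Int × Int) =>
          if pvOV d.items p.1 p.2 = true then
            (g.modify (pvNm d.items p.1) [] (fun s => PySem.Set.add s (pvNm d.items p.2))).modify
              (pvNm d.items p.2) [] (fun s => PySem.Set.add s (pvNm d.items p.1))
          else g) g p := by
    intro g p hp
    obtain ⟨hb1, hb2, hb3⟩ := pv_mem_pvPairs hp
    dsimp only
    rw [hnm p.1, hnm p.2, hiv p.1 hb1 (by omega), hiv p.2 (by omega) hb3]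
    exact if_congr (pv_cond_iff d.items p.1 p.2) rfl rfl
  rw [PySem.List.foldl_congr_mem _ _ _ _ hstep]
  apply pv_A_main d.items hnd'
  · have h := PySem.Dict.items_foldl_insert_fresh d.keys (fun a => a)
      (fun _ => (PySem.Set.empty : PySem.Set String)) PySem.Dict.empty
      (by intro a _; rfl) (by simpa using hnd)
    rw [hkeys]
    show (List.foldl (fun g v => g.insert v PySem.Set.empty) PySem.Dict.empty d.keys).items.map Prod.fst
      = d.items.map Prod.fst
    rw [show (List.foldl (fun g v => g.insert v PySem.Set.empty) PySem.Dict.empty d.keys)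
        = (List.foldl (fun g a => g.insert ((fun (a : String) => a) a)
            ((fun _ => (PySem.Set.empty : PySem.Set String)) a)) PySem.Dict.empty d.keys) from rfl, h]
    simp [hkeys, Function.comp, PySem.Dict.empty]
  · intro k h0 h1
    have hmem0 : (pvNm d.items k, (PySem.Set.empty : PySem.Set String))
        ∈ (List.foldl (fun g v => g.insert v PySem.Set.empty) PySem.Dict.empty d.keys).items := by
      have h := PySem.Dict.items_foldl_insert_fresh d.keys (fun a => a)
        (fun _ => (PySem.Set.empty : PySem.Set String)) PySem.Dict.empty
        (by intro a _; rfl) (by simpa using hnd)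
      rw [show (List.foldl (fun g v => g.insert v PySem.Set.empty) PySem.Dict.empty d.keys)
          = (List.foldl (fun g a => g.insert ((fun (a : String) => a) a)
              ((fun _ => (PySem.Set.empty : PySem.Set String)) a)) PySem.Dict.empty d.keys) from rfl, h]
      have : pvNm d.items k ∈ d.keys := by rw [hkeys]; exact pv_bounds_nm_mem d.items h0 h1
      exact List.mem_map_of_mem this
    have hkeys0 : (List.foldl (fun (g : PySem.Dict String (PySem.Set String)) v => g.insert v PySem.Set.empty) PySem.Dict.empty d.keys).keys.Nodup := by
      exact PySem.Dict.nodup_keys_foldl_insert d.keys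
        (fun _ _ => (PySem.Set.empty : PySem.Set String)) PySem.Dict.empty
        PySem.Dict.nodup_keys_empty
    exact PySem.Dict.getD_of_mem_items _ hmem0 hkeys0 []

def pvStep (items : List (String × List Int)) (st : List (List Int) × List Int) (i : Int) :
    List (List Int) × List Int :=
  let active := st.2.filter (fun j => decide (pvLo items i ≤ pvHi items j))
  let adj := active.foldl (fun adj j =>
      if pvLo items j ≤ pvHi items i then
        PySem.List.pySetD (PySem.List.pySetD adj i (PySem.List.pyGetD adj i [] ++ [j])) j
          (PySem.List.pyGetD adj j [] ++ [i])
      else adj) st.1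
  (adj, active ++ [i])

def pvInv (items : List (String × List Int)) (P : List Int) (st : List (List Int) × List Int) : Prop :=
  st.1.length = items.length
  ∧ (∀ k : Int, 0 ≤ k → k < (items.length : Int) →
      (PySem.List.pyGetD st.1 k []).Nodup
      ∧ (∀ j : Int, j ∈ PySem.List.pyGetD st.1 k []
           ↔ (j ∈ P ∧ k ∈ P ∧ j ≠ k ∧ pvOV items k j = true)))
  ∧ st.2.Nodup
  ∧ (∀ j, j ∈ st.2 → j ∈ P)
  ∧ (∀ m, P.getLast? = some m →
      ∀ j, j ∈ st.2 ↔ (j ∈ P ∧ (pvLo items m ≤ pvHi items j ∨ j = m)))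
  ∧ (P = [] → st.2 = [])

lemma pv_getD_setD {α : Type} (xs : List α) (i j : Int) (v d : α)
    (hi0 : 0 ≤ i) (hi1 : i < (xs.length : Int)) (hj0 : 0 ≤ j) :
    PySem.List.pyGetD (PySem.List.pySetD xs i v) j d = if j = i then v else PySem.List.pyGetD xs j d := by
  have hi : i = ((i.toNat : Nat) : Int) := (Int.toNat_of_nonneg hi0).symm
  have hj : j = ((j.toNat : Nat) : Int) := (Int.toNat_of_nonneg hj0).symm
  rw [hi, hj, PySem.List.pyGetD_pySetD_natCast xs i.toNat j.toNat v d (by omega)]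
  by_cases h : j = i
  · rw [if_pos (by omega), if_pos (by omega)]
  · rw [if_neg (by omega), if_neg (by omega)]

lemma pv_pyGetD_const {α : Type} (n : Nat) (i : Int) (d : α) (h0 : 0 ≤ i) :
    PySem.List.pyGetD (List.replicate n d) i d = d := by
  by_cases h1 : i < (n : Int)
  · rw [PySem.List.pyGetD_eq_getElem _ _ h0 (by simpa using h1)]
    exact List.getElem_replicate _
  · rw [PySem.List.pyGetD_of_nonneg _ _ h0]
    exact List.getD_eq_default _ _ (by simp; omega)

lemma pv_inner (items : List (String × List Int)) (i : Int) (ws : List Int)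
    (adj : List (List Int))
    (hi0 : 0 ≤ i) (hi1 : i < (adj.length : Int)) (hws : ws.Nodup)
    (hwb : ∀ w ∈ ws, 0 ≤ w ∧ w < (adj.length : Int) ∧ w ≠ i) (adj' : List (List Int))
    (hadj' : adj' = ws.foldl (fun adj j => if pvLo items j ≤ pvHi items i then
        PySem.List.pySetD (PySem.List.pySetD adj i (PySem.List.pyGetD adj i [] ++ [j])) j
          (PySem.List.pyGetD adj j [] ++ [i])
      else adj) adj) :
    adj'.length = adj.length
    ∧ PySem.List.pyGetD adj' i []
        = PySem.List.pyGetD adj i [] ++ ws.filter (fun j => decide (pvLo items j ≤ pvHi items i))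
    ∧ (∀ w ∈ ws, ((pvLo items w ≤ pvHi items i) →
          PySem.List.pyGetD adj' w [] = PySem.List.pyGetD adj w [] ++ [i])
        ∧ (¬ (pvLo items w ≤ pvHi items i) →
          PySem.List.pyGetD adj' w [] = PySem.List.pyGetD adj w []))
    ∧ (∀ k : Int, 0 ≤ k → k ≠ i → k ∉ ws → PySem.List.pyGetD adj' k [] = PySem.List.pyGetD adj k []) := by
  induction ws generalizing adj with
  | nil => subst hadj'; exact ⟨rfl, by simp, by simp, fun _ _ _ _ => rfl⟩
  | cons w ws ih =>
    obtain ⟨hw0, hw1, hwi⟩ := hwb w List.mem_cons_self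
    rcases List.nodup_cons.mp hws with ⟨hwnot, hwsn⟩
    by_cases hc : pvLo items w ≤ pvHi items i
    · -- the two writes happen
      set adj1 := PySem.List.pySetD (PySem.List.pySetD adj i (PySem.List.pyGetD adj i [] ++ [w])) w
          (PySem.List.pyGetD adj w [] ++ [i]) with hadj1
      have hlen1 : adj1.length = adj.length := by
        rw [hadj1, PySem.List.length_pySetD, PySem.List.length_pySetD]
      have hget1 : ∀ k : Int, 0 ≤ k → PySem.List.pyGetD adj1 k []
          = if k = w then PySem.List.pyGetD adj w [] ++ [i]
            else if k = i then PySem.List.pyGetD adj i [] ++ [w]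
            else PySem.List.pyGetD adj k [] := by
        intro k hk0
        rw [hadj1, pv_getD_setD _ _ _ _ _ hw0 (by rw [PySem.List.length_pySetD]; omega) hk0,
          pv_getD_setD _ _ _ _ _ hi0 hi1 hk0]
      have hstep : (List.foldl (fun adj j => if pvLo items j ≤ pvHi items i then
            PySem.List.pySetD (PySem.List.pySetD adj i (PySem.List.pyGetD adj i [] ++ [j])) j
              (PySem.List.pyGetD adj j [] ++ [i])
            else adj) adj (w :: ws)) = (List.foldl (fun adj j => if pvLo items j ≤ pvHi items i then
            PySem.List.pySetD (PySem.List.pySetD adj i (PySem.List.pyGetD adj i [] ++ [j])) j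
              (PySem.List.pyGetD adj j [] ++ [i])
            else adj) adj1 ws) := by
        rw [List.foldl_cons, if_pos hc]
      obtain ⟨ihlen, ihi, ihmem, ihother⟩ := ih adj1 (by omega) hwsn
        (by intro x hx; have := hwb x (List.mem_cons_of_mem w hx); omega)
        (by rw [hadj', hstep])
      refine ⟨by omega, ?_, ?_, ?_⟩
      · rw [ihi, hget1 i hi0, if_neg (Ne.symm hwi), if_pos rfl, List.filter_cons,
          if_pos (by simpa using hc)]
        simp
      · intro x hx
        rcases List.mem_cons.mp hx with rfl | hx'
        · constructor
          · intro _
            rw [ihother x hw0 hwi hwnot, hget1 x hw0, if_pos rfl]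
          · intro hcon; exact absurd hc hcon
        · have hxb := hwb x (List.mem_cons_of_mem w hx')
          have hxw : x ≠ w := by rintro rfl; exact hwnot hx'
          constructor
          · intro hxc
            rw [(ihmem x hx').1 hxc, hget1 x hxb.1, if_neg hxw, if_neg hxb.2.2]
          · intro hxc
            rw [(ihmem x hx').2 hxc, hget1 x hxb.1, if_neg hxw, if_neg hxb.2.2]
      · intro k hk0 hki hkws
        have hkw : k ≠ w := fun h => hkws (h ▸ List.mem_cons_self)
        have hkws' : k ∉ ws := fun h => hkws (List.mem_cons_of_mem w h)
        rw [ihother k hk0 hki hkws', hget1 k hk0, if_neg hkw, if_neg hki]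
    · have hstep : (List.foldl (fun adj j => if pvLo items j ≤ pvHi items i then
            PySem.List.pySetD (PySem.List.pySetD adj i (PySem.List.pyGetD adj i [] ++ [j])) j
              (PySem.List.pyGetD adj j [] ++ [i])
            else adj) adj (w :: ws)) = (List.foldl (fun adj j => if pvLo items j ≤ pvHi items i then
            PySem.List.pySetD (PySem.List.pySetD adj i (PySem.List.pyGetD adj i [] ++ [j])) j
              (PySem.List.pyGetD adj j [] ++ [i])
            else adj) adj ws) := by
        rw [List.foldl_cons, if_neg hc]
      obtain ⟨ihlen, ihi, ihmem, ihother⟩ := ih adj hi1 hwsn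
        (by intro x hx; exact hwb x (List.mem_cons_of_mem w hx))
        (by rw [hadj', hstep])
      refine ⟨ihlen, ?_, ?_, ?_⟩
      · rw [ihi, List.filter_cons, if_neg (by simpa using hc)]
      · intro x hx
        rcases List.mem_cons.mp hx with rfl | hx'
        · exact ⟨fun h => absurd h hc, fun _ => ihother x hw0 hwi hwnot⟩
        · exact ihmem x hx'
      · intro k hk0 hki hkws
        exact ihother k hk0 hki (fun h => hkws (List.mem_cons_of_mem w h))

lemma pv_B_step (items : List (String × List Int)) (P : List Int)
    (st : List (List Int) × List Int) (i : Int)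
    (hb : ∀ x ∈ P ++ [i], 0 ≤ x ∧ x < (items.length : Int))
    (hiP : i ∉ P)
    (hmono : ∀ m ∈ P, pvLo items m ≤ pvLo items i)
    (hInv : pvInv items P st) :
    pvInv items (P ++ [i]) (pvStep items st i) := by
  obtain ⟨hlen, hadj, hactn, hactP, hactLast, hactNil⟩ := hInv
  have hib := hb i (by simp)
  have hwsmem : ∀ j, j ∈ st.2.filter (fun j => decide (pvLo items i ≤ pvHi items j))
      ↔ (j ∈ P ∧ pvLo items i ≤ pvHi items j) := by
    intro j
    rw [List.mem_filter]
    constructor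
    · rintro ⟨hj1, hj2⟩; exact ⟨hactP j hj1, by simpa using hj2⟩
    · rintro ⟨hjP, hjc⟩
      refine ⟨?_, by simpa using hjc⟩
      cases hP : P.getLast? with
      | none => exact absurd hjP (by simp [List.getLast?_eq_none_iff.mp hP])
      | some m =>
        exact (hactLast m hP j).mpr ⟨hjP,
          Or.inl (le_trans (hmono m (List.mem_of_getLast? hP)) hjc)⟩
  have hwsn : (st.2.filter (fun j => decide (pvLo items i ≤ pvHi items j))).Nodup :=
    List.Nodup.filter _ hactn
  have hwsb : ∀ w ∈ st.2.filter (fun j => decide (pvLo items i ≤ pvHi items j)),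
      0 ≤ w ∧ w < (st.1.length : Int) ∧ w ≠ i := by
    intro w hw
    have hwP := ((hwsmem w).mp hw).1
    have hwbd := hb w (List.mem_append_left _ hwP)
    exact ⟨hwbd.1, by rw [hlen]; exact hwbd.2, fun h => hiP (h ▸ hwP)⟩
  obtain ⟨hlen', hrow_i, hrow_w, hrow_o⟩ := pv_inner items i
    (st.2.filter (fun j => decide (pvLo items i ≤ pvHi items j))) st.1
    hib.1 (by rw [hlen]; exact hib.2) hwsn hwsb _ rfl
  have hrow_old_mem : ∀ k : Int, 0 ≤ k → k < (items.length : Int) →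
      ∀ j : Int, j ∈ PySem.List.pyGetD st.1 k [] ↔
        (j ∈ P ∧ k ∈ P ∧ j ≠ k ∧ pvOV items k j = true) :=
    fun k h0 h1 => (hadj k h0 h1).2
  refine ⟨by rw [pvStep]; dsimp only; rw [hlen']; exact hlen, ?_, ?_, ?_, ?_, by simp⟩
  · -- adjacency rows
    intro k hk0 hk1
    rw [pvStep]; dsimp only
    by_cases hki : k = i
    · subst hki
      have hempty : PySem.List.pyGetD st.1 k [] = [] :=
        List.eq_nil_iff_forall_not_mem.mpr
          (fun j hj => hiP (((hrow_old_mem k hk0 hk1 j).mp hj).2.1))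
      rw [hrow_i, hempty, List.nil_append]
      refine ⟨List.Nodup.filter _ hwsn, ?_⟩
      intro j
      rw [List.mem_filter, hwsmem j]
      constructor
      · rintro ⟨⟨hjP, hj1⟩, hj2⟩
        refine ⟨List.mem_append_left _ hjP, List.mem_append_right _ (by simp),
          fun h => hiP (h ▸ hjP), ?_⟩
        simp only [pvOV, Bool.and_eq_true, decide_eq_true_eq]
        exact ⟨by simpa using hj2, hj1⟩
      · rintro ⟨hjP', _, hjk, hOV⟩
        simp only [pvOV, Bool.and_eq_true, decide_eq_true_eq] at hOV
        have hjP : j ∈ P := by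
          rcases List.mem_append.mp hjP' with h | h
          · exact h
          · exact absurd (by simpa using h) hjk
        exact ⟨⟨hjP, hOV.2⟩, by simpa using hOV.1⟩
    · by_cases hkw : k ∈ st.2.filter (fun j => decide (pvLo items i ≤ pvHi items j))
      · have hkP : k ∈ P := ((hwsmem k).mp hkw).1
        have hkhi : pvLo items i ≤ pvHi items k := ((hwsmem k).mp hkw).2
        by_cases hc : pvLo items k ≤ pvHi items i
        · rw [((hrow_w k hkw).1 hc)]
          have hinotold : i ∉ PySem.List.pyGetD st.1 k [] :=
            fun h => hiP (((hrow_old_mem k hk0 hk1 i).mp h).1)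
          refine ⟨by
            simp [List.nodup_append, (hadj k hk0 hk1).1]
            exact fun a ha hai => hinotold (hai ▸ ha), ?_⟩
          intro j
          rw [List.mem_append, hrow_old_mem k hk0 hk1 j]
          constructor
          · rintro (⟨hjP, _, hjk, hOV⟩ | hj)
            · exact ⟨List.mem_append_left _ hjP, List.mem_append_left _ hkP, hjk, hOV⟩
            · have : j = i := by simpa using hj
              subst this
              refine ⟨List.mem_append_right _ (by simp), List.mem_append_left _ hkP,
                fun h => hiP (h ▸ hkP), ?_⟩
              simp only [pvOV, Bool.and_eq_true, decide_eq_true_eq]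
              exact ⟨hkhi, hc⟩
          · rintro ⟨hjP', hkP', hjk, hOV⟩
            rcases List.mem_append.mp hjP' with h | h
            · exact Or.inl ⟨h, hkP, hjk, hOV⟩
            · exact Or.inr h
        · rw [((hrow_w k hkw).2 hc)]
          refine ⟨(hadj k hk0 hk1).1, ?_⟩
          intro j
          rw [hrow_old_mem k hk0 hk1 j]
          constructor
          · rintro ⟨hjP, _, hjk, hOV⟩
            exact ⟨List.mem_append_left _ hjP, List.mem_append_left _ hkP, hjk, hOV⟩
          · rintro ⟨hjP', hkP', hjk, hOV⟩
            rcases List.mem_append.mp hjP' with h | h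
            · exact ⟨h, hkP, hjk, hOV⟩
            · exfalso
              have : j = i := by simpa using h
              subst this
              simp only [pvOV, Bool.and_eq_true, decide_eq_true_eq] at hOV
              exact hc hOV.2
      · rw [hrow_o k hk0 hki hkw]
        refine ⟨(hadj k hk0 hk1).1, ?_⟩
        intro j
        rw [hrow_old_mem k hk0 hk1 j]
        constructor
        · rintro ⟨hjP, hkP, hjk, hOV⟩
          exact ⟨List.mem_append_left _ hjP, List.mem_append_left _ hkP, hjk, hOV⟩
        · rintro ⟨hjP', hkP', hjk, hOV⟩
          have hkP : k ∈ P := by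
            rcases List.mem_append.mp hkP' with h | h
            · exact h
            · exact absurd (by simpa using h) hki
          rcases List.mem_append.mp hjP' with h | h
          · exact ⟨h, hkP, hjk, hOV⟩
          · exfalso
            have : j = i := by simpa using h
            subst this
            simp only [pvOV, Bool.and_eq_true, decide_eq_true_eq] at hOV
            exact hkw ((hwsmem k).mpr ⟨hkP, hOV.1⟩)
  · -- active nodup
    rw [pvStep]; dsimp only
    have hinot : i ∉ st.2.filter (fun j => decide (pvLo items i ≤ pvHi items j)) :=
      fun h => (hwsb i h).2.2 rfl
    simp [List.nodup_append, hwsn]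
    exact fun a ha _ hai => hiP (hai ▸ hactP a ha)
  · -- active ⊆ P ++ [i]
    rw [pvStep]; dsimp only
    intro j hj
    rcases List.mem_append.mp hj with h | h
    · exact List.mem_append_left _ ((hwsmem j).mp h).1
    · exact List.mem_append_right _ h
  · -- active characterization via last = i
    rw [pvStep]; dsimp only
    intro m hm j
    rw [List.getLast?_concat] at hm
    have hmi : m = i := by injection hm; omega
    subst hmi
    rw [List.mem_append, hwsmem j]
    constructor
    · rintro (⟨hjP, hjc⟩ | hj)
      · exact ⟨List.mem_append_left _ hjP, Or.inl hjc⟩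
      · have : j = m := by simpa using hj
        exact ⟨List.mem_append_right _ hj, Or.inr this⟩
    · rintro ⟨hjP', hjc | hji⟩
      · rcases List.mem_append.mp hjP' with h | h
        · exact Or.inl ⟨h, hjc⟩
        · exact Or.inr h
      · exact Or.inr (by simpa using hji)

lemma pv_B_loop (items : List (String × List Int)) (rest : List Int) :
    ∀ (P : List Int) (st : List (List Int) × List Int),
    (∀ x ∈ P ++ rest, 0 ≤ x ∧ x < (items.length : Int)) →
    (P ++ rest).Nodup →
    (P ++ rest).Pairwise (fun a b => pvLo items a ≤ pvLo items b) →
    pvInv items P st →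
    pvInv items (P ++ rest) (rest.foldl (pvStep items) st) := by
  induction rest with
  | nil => intro P st _ _ _ h; simpa using h
  | cons i rest ih =>
    intro P st hb hnd hpw hInv
    have hassoc : P ++ i :: rest = (P ++ [i]) ++ rest := by simp
    rw [hassoc] at hb hnd hpw ⊢
    rw [List.foldl_cons]
    apply ih (P ++ [i]) (pvStep items st i) hb hnd hpw
    apply pv_B_step items P st i
      (fun x hx => hb x (List.mem_append_left _ hx))
      (by
        rw [List.append_assoc] at hnd
        have := (List.nodup_append.mp hnd).2.2
        intro hcon
        exact this i hcon i (by simp) rfl)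
      (by
        intro m hm
        rw [List.append_assoc] at hpw
        have := (List.pairwise_append.mp hpw).2.2
        exact this m hm i (by simp))
      hInv

lemma pv_B_main (items : List (String × List Int)) (hnd' : (items.map Prod.fst).Nodup) :
    (PySem.List.pyRange 0 (items.length : Int) 1).map (fun i =>
      (pvNm items i, PySem.Set.ofList ((PySem.List.sorted (PySem.List.pyGetD
        ((PySem.List.sorted (PySem.List.pyRange 0 (items.length : Int) 1)
            (fun i => pvLo items i) false).foldl
          (pvStep items) (List.replicate items.length ([] : List Int), ([] : List Int))).1 i [])
        (fun x => x) false).map (fun j => pvNm items j))))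
    = pvCanon items := by
  have hperm := PySem.List.sorted_perm (PySem.List.pyRange 0 (items.length : Int) 1)
    (fun i => pvLo items i) false
  have hordmem : ∀ x : Int, x ∈ PySem.List.sorted (PySem.List.pyRange 0 (items.length : Int) 1)
      (fun i => pvLo items i) false ↔ (0 ≤ x ∧ x < (items.length : Int)) := by
    intro x
    rw [hperm.mem_iff, PySem.List.mem_pyRange_one]
  have hInv0 : pvInv items [] (List.replicate items.length ([] : List Int), ([] : List Int)) := by
    refine ⟨by simp, ?_, by simp, by simp, by simp, fun _ => rfl⟩
    intro k hk0 hk1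
    rw [show PySem.List.pyGetD (List.replicate items.length ([] : List Int)) k [] = []
      from pv_pyGetD_const items.length k [] hk0]
    simp
  have hfin := pv_B_loop items
    (PySem.List.sorted (PySem.List.pyRange 0 (items.length : Int) 1)
      (fun i => pvLo items i) false) [] _
    (by intro x hx; rw [List.nil_append] at hx; exact (hordmem x).mp hx)
    (by
      rw [List.nil_append]
      exact (List.Perm.nodup_iff hperm).mpr (PySem.List.nodup_pyRange_one _ _))
    (by
      rw [List.nil_append]
      exact PySem.List.sorted_pairwise _ _)
    hInv0
  rw [List.nil_append] at hfin
  obtain ⟨hlenF, hrowsF, -⟩ := hfin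
  rw [pvCanon]
  apply List.map_congr_left
  intro k hk
  rw [PySem.List.mem_pyRange_one] at hk
  obtain ⟨hknd, hkmem⟩ := hrowsF k hk.1 hk.2
  have hfilt_pw : ((PySem.List.pyRange 0 (items.length : Int) 1).filter
      (fun j => j != k && pvOV items k j)).Pairwise (· < ·) :=
    (PySem.List.pairwise_lt_pyRange_one 0 (items.length : Int)).filter _
  have hfilt_nd : ((PySem.List.pyRange 0 (items.length : Int) 1).filter
      (fun j => j != k && pvOV items k j)).Nodup :=
    List.Nodup.filter _ (PySem.List.nodup_pyRange_one _ _)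
  have hpermrow : ((PySem.List.pyRange 0 (items.length : Int) 1).filter
      (fun j => j != k && pvOV items k j)).Perm
      (PySem.List.pyGetD ((PySem.List.sorted (PySem.List.pyRange 0 (items.length : Int) 1)
          (fun i => pvLo items i) false).foldl
        (pvStep items) (List.replicate items.length ([] : List Int), ([] : List Int))).1 k []) := by
    rw [List.perm_ext_iff_of_nodup hfilt_nd hknd]
    intro j
    rw [List.mem_filter, PySem.List.mem_pyRange_one, hkmem j, hordmem j, hordmem k]
    constructor
    · rintro ⟨hjb, hcond⟩
      simp only [Bool.and_eq_true, bne_iff_ne, ne_eq] at hcond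
      exact ⟨hjb, ⟨hk.1, hk.2⟩, hcond.1, hcond.2⟩
    · rintro ⟨hjb, _, hjk, hOV⟩
      refine ⟨hjb, ?_⟩
      simp only [Bool.and_eq_true, bne_iff_ne, ne_eq]
      exact ⟨hjk, hOV⟩
  rw [PySem.List.sorted_eq_of_perm_of_pairwise_lt _ _ _ hpermrow hfilt_pw]
  congr 1
  apply PySem.Set.ofList_eq_self_of_nodup
  apply List.Nodup.map_on
  · intro x hx y hy hxy
    rw [List.mem_filter, PySem.List.mem_pyRange_one] at hx hy
    exact (pvNm_inj items hnd' hx.1.1 hx.1.2 hy.1.1 hy.1.2).mp hxy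
  · exact hfilt_nd

lemma pv_B_eq_canon (lr : List (String × List Int)) :
    build_interference_graph_alt lr = pvCanon (PySem.Dict.ofList lr).items := by
  unfold build_interference_graph_alt
  dsimp only
  have hnd : ((PySem.Dict.ofList lr).items.map Prod.fst).Nodup :=
    PySem.Dict.nodup_keys_ofList lr
  exact pv_B_main (PySem.Dict.ofList lr).items hnd

-- ===== VERDICT (by name: the statement is the Claim_ definition above) =====
theorem build_interference_graph_spec : Claim_equal_build_interference_graph := by
  intro lr _ _
  unfold Spec_build_interference_graph
  rw [pv_A_eq_canon, pv_B_eq_canon]
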